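-- pv_equiv track=rewrite | github.com/kevinm126/Hw_03 | ebay-dl.py | parse_item_price
-- ===== SOURCE A (Python) =====
-- def parse_item_price(text):
--     '''
--     returns price with no $ and in cents
--
--     >>>parse_item_price('$15.95')
--     1595
--     '''
--     cents = ''
--     for char in text:
--         if char == 't':
--             break
--         if char in '1234567890':
--             cents+= char
--     if not cents:
--         return None
--     else:
--         return int(cents)
-- ===== SOURCE B (Python) =====
-- def parse_item_price(text):
--     # Numeric evaluation: Horner accumulation value*10 + digit while scanning,
--     # no string is built and int() is never called. None means "no digit seen".
--     value = None
--     i = 0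
--     n = len(text)
--     while i < n and text[i] != 't':
--         c = text[i]
--         if '0' <= c <= '9':
--             value = (0 if value is None else value) * 10 + (ord(c) - 48)
--         i += 1
--     return value
-- ===== Notes on version B (the rewrite author's own statement) =====
-- stated objective: alternative
-- what changed: A collects digit characters into a string and parses it with int(); B never builds a string: an index-based while loop evaluates the number directly by Horner's rule (value*10 + digit) in an Optional[int] accumulator, with None meaning no digit seen.
import Mathlib
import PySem

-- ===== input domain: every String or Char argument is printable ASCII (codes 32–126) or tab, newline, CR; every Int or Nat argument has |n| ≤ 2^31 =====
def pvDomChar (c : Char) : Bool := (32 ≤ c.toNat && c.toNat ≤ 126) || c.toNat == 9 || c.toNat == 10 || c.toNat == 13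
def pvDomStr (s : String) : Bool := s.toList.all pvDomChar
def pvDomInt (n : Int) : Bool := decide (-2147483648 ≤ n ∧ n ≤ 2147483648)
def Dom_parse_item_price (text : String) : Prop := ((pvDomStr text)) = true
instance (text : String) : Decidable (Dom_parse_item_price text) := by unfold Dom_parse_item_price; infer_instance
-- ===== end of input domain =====

-- B replaces A's collect-digits-into-a-string-then-int() by a direct numeric Horner
-- evaluation (value*10 + digit) in an Option Int accumulator (objective: alternative).

-- ===== PORT A =====
-- A's for-loop with break: cents string accumulator, stop at first 't'
def pipLoopA : List Char → List Char → List Char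
  | cents, [] => cents
  | cents, c :: rest =>
    if c = 't' then cents
    else if ("1234567890".toList.contains c) then pipLoopA (cents ++ [c]) rest
    else pipLoopA cents rest

-- int(cents) where cents is guaranteed a NONEMPTY list of chars from '1234567890'
-- (the only chars A ever appends): on that domain int() is exactly the decimal value,
-- ported by hand as the left fold a*10 + (ord(c)-48).
def pipIntOfDigits (ds : List Char) : Int :=
  ds.foldl (fun a c => a * 10 + ((c.toNat : Int) - 48)) 0

def parse_item_price (text : String) : Option Int :=
  let cents := pipLoopA [] text.toList
  if cents.isEmpty then none
  else some (pipIntOfDigits cents)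

-- ===== PORT B =====
-- B's while loop over indices, ported as recursion consuming the same chars in order;
-- the accumulator is Option Int: none = "no digit seen yet" (Python's None)
def pipGoB : Option Int → List Char → Option Int
  | acc, [] => acc
  | acc, c :: rest =>
    if c = 't' then acc
    else if ('0' ≤ c && c ≤ '9') then
      pipGoB (some ((acc.getD 0) * 10 + ((c.toNat : Int) - 48))) rest
    else pipGoB acc rest

def parse_item_price_alt (text : String) : Option Int :=
  pipGoB none text.toList

-- ===== PRECONDITION & SPEC =====
def Spec_parse_item_price (text : String) (out : Option Int) : Prop := out = parse_item_price_alt text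
instance (text : String) (out : Option Int) : Decidable (Spec_parse_item_price text out) := by unfold Spec_parse_item_price; infer_instance

-- ===== CLAIM (what is proved, stated in full; the proofs are below) =====
def Claim_equal_parse_item_price : Prop := ∀ (text : String), Dom_parse_item_price text → Spec_parse_item_price text (parse_item_price text)

-- ===== LEMMAS AND PROOFS =====

theorem char_le_iff_toNat (a b : Char) : (a ≤ b) ↔ a.toNat ≤ b.toNat := by
  rw [Char.le_def, UInt32.le_iff_toNat_le]; rfl

-- A's membership test and B's range test accept the same characters
theorem digitPred_eq (c : Char) :
    ("1234567890".toList.contains c) = ('0' ≤ c && c ≤ '9') := by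
  have h1 : ("1234567890".toList.contains c) = true ↔ (48 ≤ c.toNat ∧ c.toNat ≤ 57) := by
    rw [show "1234567890".toList = ['1','2','3','4','5','6','7','8','9','0'] from by decide]
    rw [List.contains_eq_mem, decide_eq_true_iff]
    constructor
    · intro h
      simp only [List.mem_cons, List.not_mem_nil, or_false] at h
      rcases h with h | h | h | h | h | h | h | h | h | h <;> subst h <;> decide
    · intro ⟨ha, hb⟩
      have h10 : c.toNat = 48 ∨ c.toNat = 49 ∨ c.toNat = 50 ∨ c.toNat = 51 ∨ c.toNat = 52 ∨
          c.toNat = 53 ∨ c.toNat = 54 ∨ c.toNat = 55 ∨ c.toNat = 56 ∨ c.toNat = 57 := by omega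
      have hofn : Char.ofNat c.toNat = c := Char.ofNat_toNat c
      rcases h10 with h | h | h | h | h | h | h | h | h | h <;> (rw [← hofn, h]; decide)
  have h2 : ('0' ≤ c && c ≤ '9') = true ↔ (48 ≤ c.toNat ∧ c.toNat ≤ 57) := by
    rw [Bool.and_eq_true, decide_eq_true_iff, decide_eq_true_iff,
        char_le_iff_toNat, char_le_iff_toNat]
    exact Iff.rfl
  rw [Bool.eq_iff_iff, h1, h2]

-- A's loop computes: accumulator ++ digits of the prefix before the first 't'
theorem pipLoopA_eq (l : List Char) : ∀ acc : List Char,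
    pipLoopA acc l = acc ++ (l.takeWhile (· ≠ 't')).filter (fun c => '0' ≤ c && c ≤ '9') := by
  induction l with
  | nil => intro acc; simp [pipLoopA]
  | cons c rest ih =>
    intro acc
    by_cases hc : c = 't'
    · subst hc
      simp [pipLoopA]
    · rw [pipLoopA, if_neg hc, digitPred_eq]
      cases hd : ('0' ≤ c && c ≤ '9') with
      | true =>
        simp [ih, hc, hd]
      | false =>
        simp [ih, hc, hd]

-- B's recursion computes the Horner value of those same digits, seeded from the accumulator
theorem pipGoB_eq (l : List Char) : ∀ acc : Option Int,
    pipGoB acc l =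
      (if ((l.takeWhile (· ≠ 't')).filter (fun c => '0' ≤ c && c ≤ '9')).isEmpty then acc
       else some (((l.takeWhile (· ≠ 't')).filter (fun c => '0' ≤ c && c ≤ '9')).foldl
         (fun a c => a * 10 + ((c.toNat : Int) - 48)) (acc.getD 0))) := by
  induction l with
  | nil => intro acc; simp [pipGoB]
  | cons c rest ih =>
    intro acc
    by_cases hc : c = 't'
    · subst hc
      simp [pipGoB]
    · cases hd : ('0' ≤ c && c ≤ '9') with
      | true =>
        have hstep : pipGoB acc (c :: rest) =
            pipGoB (some ((acc.getD 0) * 10 + ((c.toNat : Int) - 48))) rest := by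
          simp [pipGoB, hc, hd]
        rw [hstep, ih]
        simp only [List.takeWhile_cons, List.filter_cons, hd,
          show (decide (c ≠ 't')) = true from by simp [hc], if_true,
          List.isEmpty_cons, Bool.false_eq_true, if_false, List.foldl_cons, Option.getD_some]
        split_ifs with h
        · rw [List.isEmpty_iff.mp h]; simp
        · rfl
      | false =>
        have hstep : pipGoB acc (c :: rest) = pipGoB acc rest := by
          simp [pipGoB, hc, hd]
        rw [hstep, ih]
        simp [hc, hd]

-- ===== VERDICT (by name: the statement is the Claim_ definition above) =====
theorem parse_item_price_spec : Claim_equal_parse_item_price := by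
  intro text _
  unfold Spec_parse_item_price parse_item_price parse_item_price_alt pipIntOfDigits
  rw [pipGoB_eq, pipLoopA_eq]
  simp
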